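-- pv_equiv track=rewrite | github.com/mahnoorfatima997/macad-thesis-25 | dashboard/analysis/phase_analyzer.py | _identify_challenges
-- ===== SOURCE A (Python) =====
-- from typing import Dict, List, Any, Tuple
--
-- def _identify_challenges(content_lower: str) -> List[str]:
--     """Identify challenges based on content analysis."""
--     challenges = []
--     challenge_keywords = {
--         "requirement": "Clarifying project requirements and constraints",
--         "constraint": "Clarifying project requirements and constraints",
--         "balance": "Balancing competing design priorities",
--         "trade": "Balancing competing design priorities",
--         "sustain": "Integrating sustainable design principles",
--         "green": "Integrating sustainable design principles",
--         "budget": "Working within budget constraints",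
--         "cost": "Working within budget constraints",
--         "time": "Managing project timeline effectively",
--         "schedule": "Managing project timeline effectively",
--         "client": "Addressing stakeholder needs and feedback",
--         "stakeholder": "Addressing stakeholder needs and feedback"
--     }
--     for keyword, challenge in challenge_keywords.items():
--         if keyword in content_lower and challenge not in challenges:
--             challenges.append(challenge)
--     if not challenges:
--         challenges = [
--             "Understanding project requirements and constraints",
--             "Balancing functionality with aesthetic considerations",
--             "Integrating sustainable design principles effectively"
--         ]
--     return challenges[:3]
-- ===== SOURCE B (Python) =====
-- from typing import List
--
-- _CHALLENGE_GROUPS = [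
--     ("Clarifying project requirements and constraints", ["requirement", "constraint"]),
--     ("Balancing competing design priorities", ["balance", "trade"]),
--     ("Integrating sustainable design principles", ["sustain", "green"]),
--     ("Working within budget constraints", ["budget", "cost"]),
--     ("Managing project timeline effectively", ["time", "schedule"]),
--     ("Addressing stakeholder needs and feedback", ["client", "stakeholder"]),
-- ]
--
-- _DEFAULT_CHALLENGES = [
--     "Understanding project requirements and constraints",
--     "Balancing functionality with aesthetic considerations",
--     "Integrating sustainable design principles effectively",
-- ]
--
-- def _identify_challenges(content_lower: str) -> List[str]:
--     """Identify challenges based on content analysis."""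
--     # Single left-to-right scan of the TEXT: at each position mark every
--     # challenge one of whose keywords starts there (no per-keyword
--     # whole-text substring searches).
--     hits = [False] * len(_CHALLENGE_GROUPS)
--     for i in range(len(content_lower)):
--         hits = [h or any(content_lower.startswith(kw, i) for kw in kws)
--                 for h, (_, kws) in zip(hits, _CHALLENGE_GROUPS)]
--     challenges = [desc for h, (desc, _) in zip(hits, _CHALLENGE_GROUPS) if h]
--     return (challenges or _DEFAULT_CHALLENGES)[:3]
-- ===== Notes on version B (the rewrite author's own statement) =====
-- stated objective: alternative
-- what changed: B makes one left-to-right scan over the text, marking a per-challenge hit flag whenever one of its keywords starts at the current position, instead of A's per-keyword whole-text substring membership tests with an explicit dedup against the accumulator.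
import Mathlib
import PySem

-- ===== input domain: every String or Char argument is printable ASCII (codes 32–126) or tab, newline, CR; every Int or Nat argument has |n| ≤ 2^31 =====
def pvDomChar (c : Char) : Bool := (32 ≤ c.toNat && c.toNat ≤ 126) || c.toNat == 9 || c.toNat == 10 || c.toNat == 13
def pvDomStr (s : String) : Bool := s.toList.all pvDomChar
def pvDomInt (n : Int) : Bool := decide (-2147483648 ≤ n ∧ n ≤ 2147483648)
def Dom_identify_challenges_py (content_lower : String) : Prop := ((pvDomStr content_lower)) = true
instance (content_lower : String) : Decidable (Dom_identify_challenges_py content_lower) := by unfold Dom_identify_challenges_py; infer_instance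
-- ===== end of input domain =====

-- B scans the text once, marking per-challenge hit flags where a keyword starts, instead of A's per-keyword whole-text substring tests with an explicit dedup (objective: alternative).

-- ===== PORT A =====
-- the dict literal of A, as an insertion-ordered association list (all 12 keys distinct)
def pvChallengeKeywords : List (String × String) :=
  [("requirement", "Clarifying project requirements and constraints"),
   ("constraint", "Clarifying project requirements and constraints"),
   ("balance", "Balancing competing design priorities"),
   ("trade", "Balancing competing design priorities"),
   ("sustain", "Integrating sustainable design principles"),
   ("green", "Integrating sustainable design principles"),
   ("budget", "Working within budget constraints"),
   ("cost", "Working within budget constraints"),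
   ("time", "Managing project timeline effectively"),
   ("schedule", "Managing project timeline effectively"),
   ("client", "Addressing stakeholder needs and feedback"),
   ("stakeholder", "Addressing stakeholder needs and feedback")]

def identify_challenges_py (content_lower : String) : List String :=
  let challenges :=
    pvChallengeKeywords.foldl
      (fun acc kc =>
        if PySem.Str.isIn kc.1 content_lower && !(acc.contains kc.2) then acc ++ [kc.2] else acc)
      []
  let challenges :=
    if challenges = [] then
      ["Understanding project requirements and constraints",
       "Balancing functionality with aesthetic considerations",
       "Integrating sustainable design principles effectively"]
    else challenges
  PySem.List.slice challenges none (some 3)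

-- ===== PORT B =====
def pvChallengeGroups : List (String × List String) :=
  [("Clarifying project requirements and constraints", ["requirement", "constraint"]),
   ("Balancing competing design priorities", ["balance", "trade"]),
   ("Integrating sustainable design principles", ["sustain", "green"]),
   ("Working within budget constraints", ["budget", "cost"]),
   ("Managing project timeline effectively", ["time", "schedule"]),
   ("Addressing stakeholder needs and feedback", ["client", "stakeholder"])]

def pvDefaultChallenges : List String :=
  ["Understanding project requirements and constraints",
   "Balancing functionality with aesthetic considerations",
   "Integrating sustainable design principles effectively"]

-- content_lower.startswith(kw, i) for 0 ≤ i: exact as prefix test on the dropped character list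
def identify_challenges_py_alt (content_lower : String) : List String :=
  let cs := content_lower.toList
  let hits :=
    (List.range cs.length).foldl
      (fun hits i =>
        hits.zipWith
          (fun h (g : String × List String) =>
            h || g.2.any (fun kw => kw.toList.isPrefixOf (cs.drop i)))
          pvChallengeGroups)
      (pvChallengeGroups.map (fun _ => false))
  let challenges := ((hits.zip pvChallengeGroups).filter (·.1)).map (·.2.1)
  PySem.List.slice (if challenges = [] then pvDefaultChallenges else challenges) none (some 3)

-- ===== PRECONDITION & SPEC =====
def Spec_identify_challenges_py (content_lower : String) (out : List String) : Prop := out = identify_challenges_py_alt content_lower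
instance (content_lower : String) (out : List String) : Decidable (Spec_identify_challenges_py content_lower out) := by unfold Spec_identify_challenges_py; infer_instance

-- ===== CLAIM (what is proved, stated in full; the proofs are below) =====
def Claim_equal_identify_challenges_py : Prop := ∀ (content_lower : String), Dom_identify_challenges_py content_lower → Spec_identify_challenges_py content_lower (identify_challenges_py content_lower)

-- ===== LEMMAS AND PROOFS =====

-- ---- A-side characterisation: A's dedup loop = filter over the grouped table ----

-- A's loop step, abstracted over the hit test
def pvStep (h : String → Bool) : List String → String × String → List String :=
  fun acc kc => if h kc.1 && !(acc.contains kc.2) then acc ++ [kc.2] else acc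

theorem pvStep_stay (h : String → Bool) (c : String) (ks : List String) (acc : List String)
    (hc : acc.contains c = true) :
    (ks.map (fun k => (k, c))).foldl (pvStep h) acc = acc := by
  induction ks with
  | nil => rfl
  | cons k ks ih =>
      simp only [List.map, List.foldl, pvStep, hc]
      simpa using ih

theorem pvStep_group (h : String → Bool) (c : String) (ks : List String) (acc : List String)
    (hc : acc.contains c = false) :
    (ks.map (fun k => (k, c))).foldl (pvStep h) acc
      = if ks.any h then acc ++ [c] else acc := by
  induction ks with
  | nil => rfl
  | cons k ks ih =>
      simp only [List.map, List.foldl, pvStep, hc]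
      by_cases hk : h k = true
      · simp only [hk, Bool.true_and, Bool.not_false]
        rw [if_pos trivial, pvStep_stay h c ks (acc ++ [c]) (by simp)]
        simp [hk]
      · simp only [Bool.not_eq_true] at hk
        simp [hk, ih]

theorem pvStep_groups (h : String → Bool) (gs : List (String × List String)) (acc : List String)
    (hfresh : ∀ g ∈ gs, acc.contains g.1 = false) (hnd : (gs.map (·.1)).Nodup) :
    (gs.flatMap (fun g => g.2.map (fun k => (k, g.1)))).foldl (pvStep h) acc
      = acc ++ (gs.filter (fun g => g.2.any h)).map (·.1) := by
  induction gs generalizing acc with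
  | nil => simp
  | cons g gs ih =>
      simp only [List.flatMap_cons, List.foldl_append]
      rw [pvStep_group h g.1 g.2 acc (hfresh g (by simp))]
      simp only [List.map, List.nodup_cons] at hnd
      by_cases hg : g.2.any h = true
      · rw [if_pos hg, ih (acc ++ [g.1]) ?_ hnd.2]
        · simp [hg]
        · intro g' hg'
          have h1 : acc.contains g'.1 = false := hfresh g' (by simp [hg'])
          have h2 : g.1 ≠ g'.1 := fun e => hnd.1 (e ▸ List.mem_map_of_mem hg')
          simp only [List.contains_eq_mem, List.mem_append, List.mem_singleton, decide_eq_false_iff_not]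
          simp only [List.contains_eq_mem, decide_eq_false_iff_not] at h1
          exact fun hh => hh.elim h1 (fun e => h2 e.symm)
      · simp only [Bool.not_eq_true] at hg
        rw [if_neg (by simp [hg]), ih acc (fun g' hg' => hfresh g' (by simp [hg'])) hnd.2]
        simp [hg]

-- the two literal tables describe the same data
theorem pvTables :
    pvChallengeKeywords = pvChallengeGroups.flatMap (fun g => g.2.map (fun k => (k, g.1))) := by
  decide

-- ---- B-side characterisation: the positional scan's final flags = per-group substring hits ----

theorem pvZipWith_map {α β γ : Type} (f : γ → α → β) (g : α → γ) (l : List α) :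
    List.zipWith f (l.map g) l = l.map (fun x => f (g x) x) := by
  induction l with
  | nil => rfl
  | cons x l ih => simp [ih]

theorem pvAny_congr_mem {α : Type} (l : List α) (p q : α → Bool)
    (h : ∀ x ∈ l, p x = q x) : l.any p = l.any q := by
  induction l with
  | nil => rfl
  | cons x l ih => simp [h x (by simp), ih (fun y hy => h y (by simp [hy]))]

theorem pvAny_comm {α β : Type} (l1 : List α) (l2 : List β) (p : α → β → Bool) :
    l1.any (fun a => l2.any (p a)) = l2.any (fun b => l1.any (fun a => p a b)) := by
  rw [Bool.eq_iff_iff]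
  simp only [List.any_eq_true]
  tauto

-- a nonempty keyword starts at some position i < len iff it is a substring
theorem pvScan_eq_isIn (cs : List Char) (kw : List Char) (hk : kw ≠ []) :
    (List.range cs.length).any (fun i => kw.isPrefixOf (cs.drop i)) = PySem.Chars.isIn kw cs := by
  by_cases h : PySem.Chars.isIn kw cs = true
  · rw [h]
    obtain ⟨j, hj⟩ := (PySem.Chars.exists_prefix_drop_iff_isIn (s := cs) (sub := kw)).mpr h
    have hjlen : j < cs.length := by
      by_contra hge
      rw [not_lt] at hge
      rw [List.drop_eq_nil_of_le hge] at hj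
      exact hk (List.prefix_nil.mp hj)
    simp only [List.any_eq_true, List.mem_range]
    exact ⟨j, hjlen, by simpa [List.isPrefixOf_iff_prefix] using hj⟩
  · simp only [Bool.not_eq_true] at h
    rw [h]
    simp only [List.any_eq_false, List.mem_range]
    intro i _
    rw [Bool.not_eq_true, ← Bool.not_eq_true, List.isPrefixOf_iff_prefix]
    intro hp
    exact (Bool.not_eq_true _ |>.mpr h) ((PySem.Chars.exists_prefix_drop_iff_isIn (s := cs) (sub := kw)).mp ⟨i, hp⟩)

-- the scan fold, characterised at every prefix length n
theorem pvScanFold (cs : List Char) (n : Nat) :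
    (List.range n).foldl
      (fun hits i =>
        hits.zipWith
          (fun h (g : String × List String) =>
            h || g.2.any (fun kw => kw.toList.isPrefixOf (cs.drop i)))
          pvChallengeGroups)
      (pvChallengeGroups.map (fun _ => false))
    = pvChallengeGroups.map
        (fun g => (List.range n).any (fun i => g.2.any (fun kw => kw.toList.isPrefixOf (cs.drop i)))) := by
  induction n with
  | zero => simp
  | succ n ih =>
      rw [List.range_succ, List.foldl_append, List.foldl_cons, List.foldl_nil, ih,
        pvZipWith_map]
      apply List.map_congr_left
      intro g _
      simp

-- B's zip-filter assembly over flags that are a map over the same list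
theorem pvZipFilter {α β : Type} (f : α × β → Bool) (l : List (α × β)) :
    (((l.map f).zip l).filter (·.1)).map (·.2.1) = (l.filter f).map (·.1) := by
  induction l with
  | nil => rfl
  | cons x l ih =>
      cases hf : f x <;> simp [hf, ih]

theorem identify_challenges_py_eq_alt (s : String) :
    identify_challenges_py s = identify_challenges_py_alt s := by
  have key :
      List.foldl
        (fun acc (kc : String × String) =>
          if PySem.Str.isIn kc.1 s && !(acc.contains kc.2) then acc ++ [kc.2] else acc) []
        pvChallengeKeywords
      = [] ++ (pvChallengeGroups.filter (fun g => g.2.any (fun kw => PySem.Str.isIn kw s))).map (·.1) := by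
    rw [pvTables]
    exact pvStep_groups (fun k => PySem.Str.isIn k s) pvChallengeGroups [] (fun g _ => rfl) (by decide)
  have hmap : pvChallengeGroups.map
      (fun g => (List.range s.toList.length).any
        (fun i => g.2.any (fun kw => kw.toList.isPrefixOf (s.toList.drop i))))
      = pvChallengeGroups.map (fun g => g.2.any (fun kw => PySem.Str.isIn kw s)) := by
    apply List.map_congr_left
    intro g hg
    rw [pvAny_comm]
    apply pvAny_congr_mem
    intro kw hkw
    have hk : kw.toList ≠ [] := by
      fin_cases hg <;> fin_cases hkw <;> decide
    rw [pvScan_eq_isIn s.toList kw.toList hk]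
    simp [PySem.Str.isIn]
  simp only [identify_challenges_py, identify_challenges_py_alt, key, pvScanFold, hmap,
    pvZipFilter, pvDefaultChallenges, List.nil_append]

-- ===== VERDICT (by name: the statement is the Claim_ definition above) =====
theorem identify_challenges_py_spec : Claim_equal_identify_challenges_py := by
  intro s _
  exact identify_challenges_py_eq_alt s
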